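-- pv_equiv track=rewrite | github.com/tom-pollak/computer-science | sof1/week6/week6-seminar.py | get_rec
-- ===== SOURCE A (Python) =====
-- def get_rec(matrix, max_sum, i, j):
--     subgraphs = [0 for z in matrix[i]]
--     for k in range(i, len(matrix)):
--         mat_sum = 0
--         for l in range(j, len(matrix[i])):
--             mat_sum += matrix[k][l]
--             if mat_sum + subgraphs[l] > max_sum:
--                 max_sum = mat_sum + subgraphs[l]
--             subgraphs[l] += mat_sum
--             # optimisation: if a subgraph has a negative total then the program
--             # does not create anymore subgraphs which incorporate that subgraph
--             # elif mat_sum < 0: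
--             #     bp = l
--             #     break
--     return max_sum
-- ===== SOURCE B (Python) =====
-- def get_rec(matrix, max_sum, i, j):
--     cols = len(matrix[i])
--     best = max_sum
--     for k in range(i, len(matrix)):
--         for l in range(j, cols):
--             s = sum(matrix[r][c] for r in range(i, k + 1)
--                     for c in range(j, l + 1))
--             best = max(best, s)
--     return best
-- ===== Notes on version B (the rewrite author's own statement) =====
-- stated objective: simpler
-- what changed: A maintains a running per-column accumulator (subgraphs) plus a row prefix sum to grow rectangle sums incrementally; B simply enumerates every bottom-right corner (k,l) and recomputes the rectangle sum from (i,j) directly, taking the running maximum.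
-- outside the precondition, e.g. on get_rec([[1, 2], [3, 4]], 0, 0, -1): A returns 22, B returns 16
import Mathlib
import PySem

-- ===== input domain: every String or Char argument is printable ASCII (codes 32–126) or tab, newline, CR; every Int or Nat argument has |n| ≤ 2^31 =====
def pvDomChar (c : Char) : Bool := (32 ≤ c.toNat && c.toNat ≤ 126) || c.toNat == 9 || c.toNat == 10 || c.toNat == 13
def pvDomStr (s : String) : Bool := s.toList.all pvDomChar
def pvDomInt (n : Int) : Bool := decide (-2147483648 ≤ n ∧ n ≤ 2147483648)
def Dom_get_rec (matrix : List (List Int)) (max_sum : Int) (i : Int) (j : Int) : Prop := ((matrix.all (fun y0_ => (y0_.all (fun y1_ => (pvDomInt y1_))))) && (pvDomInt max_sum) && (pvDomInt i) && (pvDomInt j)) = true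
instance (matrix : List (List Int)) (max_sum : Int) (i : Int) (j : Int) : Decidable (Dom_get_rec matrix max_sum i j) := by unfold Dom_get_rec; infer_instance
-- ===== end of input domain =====

-- B replaces A's incremental per-column accumulator with a direct enumeration of all
-- rectangles anchored at (i,j) (simpler and plainer, not faster).

-- ===== PORT A =====
-- Python list assignment xs[idx] = v; exact where Python does not raise IndexError
-- (out-of-range assignments are outside Pre_get_rec, where this returns xs unchanged).
def pySetItem (xs : List Int) (idx : Int) (v : Int) : List Int :=
  let n : Int := if idx < 0 then idx + xs.length else idx
  if 0 ≤ n ∧ n < (xs.length : Int) then xs.set n.toNat v else xs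

-- one step of A's inner loop: state ((subgraphs, max_sum), mat_sum), column l
def aInner (m : List (List Int)) (k : Int) (q : (List Int × Int) × Int) (l : Int) :
    (List Int × Int) × Int :=
  let mat_sum := q.2 + PySem.List.pyGetD (PySem.List.pyGetD m k []) l 0
  let v := PySem.List.pyGetD q.1.1 l 0
  ((pySetItem q.1.1 l (v + mat_sum),
    if mat_sum + v > q.1.2 then mat_sum + v else q.1.2), mat_sum)

-- one iteration of A's outer loop (row k): run the inner loop with mat_sum = 0
def aRow (m : List (List Int)) (j : Int) (cols : Nat) (st : List Int × Int) (k : Int) :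
    List Int × Int :=
  ((PySem.List.pyRange j (cols : Int)).foldl (aInner m k) (st, 0)).1

def get_rec (matrix : List (List Int)) (max_sum : Int) (i : Int) (j : Int) : Int :=
  let subgraphs : List Int := (PySem.List.pyGetD matrix i []).map (fun _ => (0 : Int))
  ((PySem.List.pyRange i (matrix.length : Int)).foldl
      (aRow matrix j (PySem.List.pyGetD matrix i []).length)
      (subgraphs, max_sum)).2

-- ===== PORT B =====
-- sum(matrix[r][c] for r in range(i, k+1) for c in range(j, l+1))
def bSum (m : List (List Int)) (i j k l : Int) : Int :=
  ((PySem.List.pyRange i (k + 1)).map (fun r =>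
    ((PySem.List.pyRange j (l + 1)).map (fun c =>
      PySem.List.pyGetD (PySem.List.pyGetD m r []) c 0)).sum)).sum

def get_rec_alt (matrix : List (List Int)) (max_sum : Int) (i : Int) (j : Int) : Int :=
  let cols : Int := ((PySem.List.pyGetD matrix i []).length : Int)
  (PySem.List.pyRange i (matrix.length : Int)).foldl
    (fun best k =>
      (PySem.List.pyRange j cols).foldl
        (fun best l => max best (bSum matrix i j k l)) best)
    max_sum

-- ===== PRECONDITION & SPEC =====
-- Pre_ excludes the inputs where Python A raises IndexError (i out of range, or a row
-- reached from row i shorter than row i while columns are actually scanned), and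
-- additionally the inputs with j < 0, on which A returns a value that is an accident of
-- Python's negative-index wraparound (subgraphs[l] for l < 0 aliases a high column's
-- accumulator, mixing unrelated columns' sums).
def Pre_get_rec (matrix : List (List Int)) (max_sum : Int) (i : Int) (j : Int) : Prop :=
  -(matrix.length : Int) ≤ i ∧ i < (matrix.length : Int) ∧ 0 ≤ j ∧
  (∀ k ∈ PySem.List.pyRange i (matrix.length : Int),
     j < ((PySem.List.pyGetD matrix i []).length : Int) →
     (PySem.List.pyGetD matrix i []).length ≤ (PySem.List.pyGetD matrix k []).length)
instance (matrix : List (List Int)) (max_sum : Int) (i : Int) (j : Int) : Decidable (Pre_get_rec matrix max_sum i j) := by unfold Pre_get_rec; infer_instance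

def pvWitness_get_rec : List (List Int) × Int × Int × Int := ([[1, 2], [3, 4]], 0, 0, 0)

def Spec_get_rec (matrix : List (List Int)) (max_sum : Int) (i : Int) (j : Int) (out : Int) : Prop := out = get_rec_alt matrix max_sum i j
instance (matrix : List (List Int)) (max_sum : Int) (i : Int) (j : Int) (out : Int) : Decidable (Spec_get_rec matrix max_sum i j out) := by unfold Spec_get_rec; infer_instance

-- ===== CLAIM (what is proved, stated in full; the proofs are below) =====
def Claim_equal_get_rec : Prop := ∀ (matrix : List (List Int)) (max_sum : Int) (i : Int) (j : Int), Dom_get_rec matrix max_sum i j → Pre_get_rec matrix max_sum i j → Spec_get_rec matrix max_sum i j (get_rec matrix max_sum i j)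

-- ===== LEMMAS AND PROOFS =====

-- matrix[k][l] as both ports read it
def cellf (m : List (List Int)) (k l : Int) : Int :=
  PySem.List.pyGetD (PySem.List.pyGetD m k []) l 0

-- A's mat_sum after scanning columns a..l of row k (starting from 0)
def pref (m : List (List Int)) (a k l : Int) : Int :=
  ((PySem.List.pyRange a (l + 1)).map (cellf m k)).sum

lemma length_pySetItem (xs : List Int) (idx v : Int) :
    (pySetItem xs idx v).length = xs.length := by
  unfold pySetItem
  dsimp only
  by_cases h : idx < 0 <;> simp only [h, if_true, if_false] <;> split <;> simp

lemma pyGetD_pySetItem (xs : List Int) (idx : Int) (hidx : 0 ≤ idx) (v t : Int)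
    (ht : 0 ≤ t) :
    PySem.List.pyGetD (pySetItem xs idx v) t 0 =
      if t = idx ∧ idx < (xs.length : Int) then v else PySem.List.pyGetD xs t 0 := by
  unfold pySetItem
  have hn : ¬ idx < 0 := by omega
  simp only [hn, if_false]
  rw [PySem.List.pyGetD_of_nonneg _ _ ht, PySem.List.pyGetD_of_nonneg _ _ ht]
  simp only [List.getD_eq_getElem?_getD]
  by_cases hr : 0 ≤ idx ∧ idx < (xs.length : Int)
  · rw [if_pos hr, List.getElem?_set]
    by_cases he : t = idx
    · subst he
      rw [if_pos (show t = t ∧ t < (xs.length : Int) from ⟨rfl, hr.2⟩),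
        if_pos (rfl : t.toNat = t.toNat), if_pos (show t.toNat < xs.length by omega)]
      rfl
    · rw [if_neg (show ¬ (t = idx ∧ idx < (xs.length : Int)) from fun h => he h.1),
        if_neg (show ¬ idx.toNat = t.toNat by omega)]
  · rw [if_neg hr, if_neg (show ¬ (t = idx ∧ idx < (xs.length : Int)) by omega)]

lemma pref_cons (m : List (List Int)) (a k l : Int) (h : a ≤ l) :
    pref m a k l = cellf m k a + pref m (a + 1) k l := by
  unfold pref
  rw [PySem.List.pyRange_one_cons (by omega : a < l + 1)]
  simp

lemma pref_self (m : List (List Int)) (a k : Int) :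
    pref m a k a = cellf m k a := by
  unfold pref
  rw [PySem.List.pyRange_one_singleton]
  simp

-- characterisation of A's inner loop over columns a..b-1 of row k
lemma inner_char (m : List (List Int)) (k : Int) :
    ∀ (n : Nat) (a b : Int), (b - a).toNat = n → 0 ≤ a →
    ∀ (subs : List Int) (ms acc : Int),
    (((PySem.List.pyRange a b).foldl (aInner m k) ((subs, ms), acc)).1.1.length
        = subs.length) ∧
    (∀ t : Int, 0 ≤ t →
      PySem.List.pyGetD ((PySem.List.pyRange a b).foldl (aInner m k) ((subs, ms), acc)).1.1 t 0 =
        if a ≤ t ∧ t < b ∧ t < (subs.length : Int)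
        then PySem.List.pyGetD subs t 0 + acc + pref m a k t
        else PySem.List.pyGetD subs t 0) ∧
    (((PySem.List.pyRange a b).foldl (aInner m k) ((subs, ms), acc)).1.2 =
      (PySem.List.pyRange a b).foldl
        (fun s l => max s (acc + pref m a k l + PySem.List.pyGetD subs l 0)) ms) := by
  intro n
  induction n with
  | zero =>
    intro a b hn ha subs ms acc
    rw [PySem.List.pyRange_one_eq_nil (by omega : b ≤ a)]
    refine ⟨rfl, fun t ht => ?_, rfl⟩
    rw [if_neg (by omega : ¬ (a ≤ t ∧ t < b ∧ t < (subs.length : Int)))]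
    rfl
  | succ n ih =>
    intro a b hn ha subs ms acc
    have hab : a < b := by omega
    rw [PySem.List.pyRange_one_cons hab]
    simp only [List.foldl_cons]
    set mat_sum := acc + cellf m k a with hmat
    set v := PySem.List.pyGetD subs a 0 with hv
    have hstep : aInner m k ((subs, ms), acc) a =
        ((pySetItem subs a (v + mat_sum),
          if mat_sum + v > ms then mat_sum + v else ms), mat_sum) := by
      simp [aInner, cellf, hmat, hv]
    rw [hstep]
    set subs1 := pySetItem subs a (v + mat_sum) with hsubs1
    set ms1 := if mat_sum + v > ms then mat_sum + v else ms with hms1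
    have hlen1 : subs1.length = subs.length := length_pySetItem _ _ _
    obtain ⟨ihlen, ihget, ihms⟩ :=
      ih (a + 1) b (by omega) (by omega) subs1 ms1 mat_sum
    have hget1 : ∀ t : Int, 0 ≤ t →
        PySem.List.pyGetD subs1 t 0 =
          if t = a ∧ a < (subs.length : Int) then v + mat_sum
          else PySem.List.pyGetD subs t 0 :=
      fun t ht => pyGetD_pySetItem subs a ha (v + mat_sum) t ht
    refine ⟨by rw [ihlen, hlen1], fun t ht => ?_, ?_⟩
    · rw [ihget t ht, hlen1]
      by_cases h1 : a + 1 ≤ t ∧ t < b ∧ t < (subs.length : Int)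
      · rw [if_pos h1, if_pos (by omega : a ≤ t ∧ t < b ∧ t < (subs.length : Int))]
        rw [hget1 t ht, if_neg (by omega : ¬ (t = a ∧ a < (subs.length : Int)))]
        rw [pref_cons m a k t (by omega), hmat]
        ring
      · rw [if_neg h1, hget1 t ht]
        by_cases hta : t = a
        · by_cases hin : t < (subs.length : Int)
          · rw [if_pos (show t = a ∧ a < (subs.length : Int) from ⟨hta, by omega⟩),
              if_pos (show a ≤ t ∧ t < b ∧ t < (subs.length : Int) by omega)]
            rw [hta, pref_self, hmat, hv]
            ring
          · rw [if_neg (show ¬ (t = a ∧ a < (subs.length : Int)) by omega),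
              if_neg (show ¬ (a ≤ t ∧ t < b ∧ t < (subs.length : Int)) by omega)]
        · rw [if_neg (show ¬ (t = a ∧ a < (subs.length : Int)) from fun h => hta h.1),
            if_neg (show ¬ (a ≤ t ∧ t < b ∧ t < (subs.length : Int)) by omega)]
    · rw [ihms]
      have hfirst : max ms (acc + pref m a k a + v) = ms1 := by
        rw [pref_self]
        rw [hms1, hmat]
        omega
      rw [← hfirst]
      apply PySem.List.foldl_congr_mem
      intro s l hl
      obtain ⟨hla, hlb⟩ := PySem.List.mem_pyRange_one.mp hl
      rw [hget1 l (by omega)]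
      rw [if_neg (by omega : ¬ (l = a ∧ a < (subs.length : Int)))]
      rw [pref_cons m a k l (by omega), hmat]
      ring_nf

-- bSum splits off its last row (i ≤ t)
lemma bSum_split (m : List (List Int)) (i j t l : Int) (hit : i ≤ t) :
    bSum m i j t l =
      ((PySem.List.pyRange i t).map (fun r => pref m j r l)).sum + pref m j t l := by
  unfold bSum pref cellf
  rw [PySem.List.pyRange_one_append i t (t + 1) hit (by omega),
      PySem.List.pyRange_one_singleton]
  simp

-- A's outer loop from row t matches B's outer loop, given the subgraphs invariant
lemma outer_char (m : List (List Int)) (i j : Int) (hj : 0 ≤ j) :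
    ∀ (n : Nat) (t : Int), ((m.length : Int) - t).toNat = n → i ≤ t →
    ∀ (subs : List Int), subs.length = (PySem.List.pyGetD m i []).length →
    (∀ l : Int, 0 ≤ l →
      PySem.List.pyGetD subs l 0 =
        if j ≤ l ∧ l < ((PySem.List.pyGetD m i []).length : Int)
        then ((PySem.List.pyRange i t).map (fun r => pref m j r l)).sum
        else 0) →
    ∀ (ms : Int),
    ((PySem.List.pyRange t (m.length : Int)).foldl
        (aRow m j (PySem.List.pyGetD m i []).length) (subs, ms)).2 =
      (PySem.List.pyRange t (m.length : Int)).foldl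
        (fun best k =>
          (PySem.List.pyRange j ((PySem.List.pyGetD m i []).length : Int)).foldl
            (fun best l => max best (bSum m i j k l)) best)
        ms := by
  intro n
  induction n with
  | zero =>
    intro t hn hit subs hlen hsubs ms
    rw [PySem.List.pyRange_one_eq_nil (by omega : (m.length : Int) ≤ t)]
    rfl
  | succ n ih =>
    intro t hn hit subs hlen hsubs ms
    have htm : t < (m.length : Int) := by omega
    rw [PySem.List.pyRange_one_cons htm]
    simp only [List.foldl_cons]
    set cols := (PySem.List.pyGetD m i []).length with hcols
    obtain ⟨ilen, iget, ims⟩ :=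
      inner_char m t ((cols : Int) - j).toNat j (cols : Int) rfl hj subs ms 0
    have hrow : aRow m j cols (subs, ms) t =
        (((PySem.List.pyRange j (cols : Int)).foldl (aInner m t) ((subs, ms), 0)).1.1,
         ((PySem.List.pyRange j (cols : Int)).foldl (aInner m t) ((subs, ms), 0)).1.2) :=
      rfl
    rw [hrow, ims]
    -- the new max_sum equals B's inner fold on row t
    have hms : (PySem.List.pyRange j (cols : Int)).foldl
        (fun s l => max s (0 + pref m j t l + PySem.List.pyGetD subs l 0)) ms =
        (PySem.List.pyRange j (cols : Int)).foldl
          (fun best l => max best (bSum m i j t l)) ms := by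
      apply PySem.List.foldl_congr_mem
      intro s l hl
      obtain ⟨hjl, hlc⟩ := PySem.List.mem_pyRange_one.mp hl
      rw [hsubs l (by omega), if_pos ⟨hjl, hlc⟩, bSum_split m i j t l hit]
      omega
    rw [hms]
    -- the updated subgraphs satisfy the invariant for row t + 1
    apply ih (t + 1) (by omega) (by omega)
    · rw [ilen, hlen]
    · intro l hl
      rw [iget l hl, hlen]
      by_cases hc : j ≤ l ∧ l < (cols : Int)
      · rw [if_pos (by omega : j ≤ l ∧ l < (cols : Int) ∧ l < (cols : Int)),
          hsubs l hl, if_pos hc, if_pos hc,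
          PySem.List.pyRange_one_append i t (t + 1) hit (by omega),
          PySem.List.pyRange_one_singleton]
        simp
      · rw [if_neg (by omega : ¬ (j ≤ l ∧ l < (cols : Int) ∧ l < (cols : Int))),
          hsubs l hl, if_neg hc, if_neg hc]

lemma pyGetD_map_zero (xs : List Int) (l : Int) :
    PySem.List.pyGetD (xs.map (fun _ => (0 : Int))) l 0 = 0 := by
  unfold PySem.List.pyGetD PySem.List.pyGet?
  cases hpi : PySem.List.pyIdx? (xs.map fun _ => (0 : Int)).length l with
  | none => rfl
  | some a =>
    simp only [Option.bind_some, List.getElem?_map]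
    cases xs[a]? <;> rfl

-- ===== VERDICT (by name: the statement is the Claim_ definition above) =====
theorem get_rec_spec : Claim_equal_get_rec := by
  intro matrix max_sum i j _ hpre
  obtain ⟨_, _, hj, _⟩ := hpre
  unfold Spec_get_rec get_rec get_rec_alt
  dsimp only
  apply outer_char matrix i j hj ((matrix.length : Int) - i).toNat i rfl le_rfl
  · simp
  · intro l hl
    rw [pyGetD_map_zero, PySem.List.pyRange_one_eq_nil le_rfl]
    simp [ite_self]
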